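-- pv_equiv track=rewrite | github.com/golanghack/programming_pro | recursi/compute_woods.py | compute_wood
-- ===== SOURCE A (Python) =====
-- def compute_wood(t: list, h: int) -> list:
--     """Return uantities woods from height wood in forest."""
--
--     if t == []:
--         return 0
--     else:
--         if t[0] > h:
--             return t[0] - h + compute_wood(t[1:], h)
--         else:
--             return compute_wood(t[1:], h)
-- ===== SOURCE B (Python) =====
-- def compute_wood(t: list, h: int) -> list:
--     """Return uantities woods from height wood in forest."""
--     return sum(x - h for x in t if x > h)
-- ===== Notes on version B (the rewrite author's own statement) =====
-- stated objective: faster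
-- what changed: Replaced the recursion that re-slices the list at every step with a single generator-sum pass over the list.
import Mathlib
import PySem

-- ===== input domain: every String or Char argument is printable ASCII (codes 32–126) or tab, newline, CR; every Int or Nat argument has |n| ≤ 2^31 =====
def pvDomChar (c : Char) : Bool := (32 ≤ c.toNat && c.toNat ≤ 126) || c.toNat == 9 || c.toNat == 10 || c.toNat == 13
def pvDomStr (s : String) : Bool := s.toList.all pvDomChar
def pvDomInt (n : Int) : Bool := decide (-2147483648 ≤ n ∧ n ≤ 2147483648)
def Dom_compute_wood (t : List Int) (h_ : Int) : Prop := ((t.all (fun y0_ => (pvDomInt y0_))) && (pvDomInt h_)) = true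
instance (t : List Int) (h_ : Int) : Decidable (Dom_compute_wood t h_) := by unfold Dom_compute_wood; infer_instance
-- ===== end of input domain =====

-- B replaces A's recursion (which re-slices the list at every step) with one linear pass summing (x - h) for x > h.

-- ===== PORT A =====
def compute_wood (t : List Int) (h_ : Int) : Int :=
  match t with
  | [] => 0
  | x :: rest =>
    if x > h_ then x - h_ + compute_wood rest h_
    else compute_wood rest h_

-- ===== PORT B =====
def compute_wood_alt (t : List Int) (h_ : Int) : Int :=
  ((t.filter (fun x => x > h_)).map (fun x => x - h_)).sum

-- ===== PRECONDITION & SPEC =====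
def Spec_compute_wood (t : List Int) (h_ : Int) (out : Int) : Prop := out = compute_wood_alt t h_
instance (t : List Int) (h_ : Int) (out : Int) : Decidable (Spec_compute_wood t h_ out) := by unfold Spec_compute_wood; infer_instance

-- ===== CLAIM (what is proved, stated in full; the proofs are below) =====
def Claim_equal_compute_wood : Prop := ∀ (t : List Int) (h_ : Int), Dom_compute_wood t h_ → Spec_compute_wood t h_ (compute_wood t h_)

-- ===== LEMMAS AND PROOFS =====
theorem compute_wood_eq_alt (t : List Int) (h_ : Int) :
    compute_wood t h_ = compute_wood_alt t h_ := by
  induction t with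
  | nil => simp [compute_wood, compute_wood_alt]
  | cons x rest ih =>
    simp only [compute_wood_alt] at ih ⊢
    simp only [compute_wood, List.filter_cons]
    by_cases hx : x > h_ <;> simp [hx, ih]

-- ===== VERDICT (by name: the statement is the Claim_ definition above) =====
theorem compute_wood_spec : Claim_equal_compute_wood := by
  intro t h_ _
  exact compute_wood_eq_alt t h_
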